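-- pv_equiv track=rewrite | github.com/andrewhuot/autoagent-vnextcc | agent/tools/faq.py | search_faq
-- ===== SOURCE A (Python) =====
-- FAQ_ENTRIES: list[dict] = [
--     {
--         "question": "What is your return policy?",
--         "answer": "You can return any item within 30 days of delivery for a full refund. Items must be in original condition with tags attached.",
--     },
--     {
--         "question": "How long does shipping take?",
--         "answer": "Standard shipping takes 5-7 business days. Express shipping takes 2-3 business days. Free shipping on orders over $50.",
--     },
--     {
--         "question": "How do I track my order?",
--         "answer": "You can track your order using the order ID on our website, or ask me with your order number and I'll look it up for you.",
--     },
--     {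
--         "question": "Do you offer international shipping?",
--         "answer": "Yes, we ship to over 50 countries. International shipping takes 10-15 business days. Additional customs fees may apply.",
--     },
--     {
--         "question": "How do I cancel an order?",
--         "answer": "Orders can be cancelled within 1 hour of placement if they haven't entered processing. Contact support with your order ID.",
--     },
--     {
--         "question": "What payment methods do you accept?",
--         "answer": "We accept Visa, Mastercard, American Express, PayPal, Apple Pay, and Google Pay.",
--     },
--     {
--         "question": "How do I contact customer support?",
--         "answer": "You can reach us via this chat, email at support@autoagent.example.com, or call 1-800-555-0199 Mon-Fri 9am-6pm EST.",
--     },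
--     {
--         "question": "Do you offer warranty on products?",
--         "answer": "All electronics come with a 1-year manufacturer warranty. Furniture has a 2-year warranty. Extended warranties are available at checkout.",
--     },
--     {
--         "question": "How do I change my shipping address?",
--         "answer": "You can update your shipping address before the order ships. Go to your order details or contact support with the new address.",
--     },
--     {
--         "question": "Do you price match?",
--         "answer": "Yes, we offer price matching within 14 days of purchase. The item must be identical and from an authorized retailer.",
--     },
--     {
--         "question": "What if my item arrives damaged?",
--         "answer": "Contact support within 48 hours with photos of the damage. We'll arrange a free replacement or full refund.",
--     },
--     {
--         "question": "Do you have a loyalty program?",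
--         "answer": "Yes! Join AutoRewards for free. Earn 1 point per dollar spent. 100 points = $5 off. Plus exclusive member-only deals.",
--     },
-- ]
--
-- def search_faq(query: str) -> list[dict]:
--     """Search FAQ entries by keyword matching, returning top 3 results.
--
--     Args:
--         query: Search query string.
--
--     Returns:
--         List of up to 3 matching FAQ dicts with question and answer.
--     """
--     query_lower = query.lower()
--     terms = query_lower.split()
--
--     scored: list[tuple[int, dict]] = []
--     for entry in FAQ_ENTRIES:
--         searchable = f"{entry['question']} {entry['answer']}".lower()
--         score = sum(1 for term in terms if term in searchable)
--         if score > 0: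
--             scored.append((score, entry))
--
--     scored.sort(key=lambda x: x[0], reverse=True)
--     return [entry for _, entry in scored[:3]]
-- ===== SOURCE B (Python) =====
-- FAQ_ENTRIES: list[dict] = [
--     {
--         "question": "What is your return policy?",
--         "answer": "You can return any item within 30 days of delivery for a full refund. Items must be in original condition with tags attached.",
--     },
--     {
--         "question": "How long does shipping take?",
--         "answer": "Standard shipping takes 5-7 business days. Express shipping takes 2-3 business days. Free shipping on orders over $50.",
--     },
--     {
--         "question": "How do I track my order?",
--         "answer": "You can track your order using the order ID on our website, or ask me with your order number and I'll look it up for you.",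
--     },
--     {
--         "question": "Do you offer international shipping?",
--         "answer": "Yes, we ship to over 50 countries. International shipping takes 10-15 business days. Additional customs fees may apply.",
--     },
--     {
--         "question": "How do I cancel an order?",
--         "answer": "Orders can be cancelled within 1 hour of placement if they haven't entered processing. Contact support with your order ID.",
--     },
--     {
--         "question": "What payment methods do you accept?",
--         "answer": "We accept Visa, Mastercard, American Express, PayPal, Apple Pay, and Google Pay.",
--     },
--     {
--         "question": "How do I contact customer support?",
--         "answer": "You can reach us via this chat, email at support@autoagent.example.com, or call 1-800-555-0199 Mon-Fri 9am-6pm EST.",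
--     },
--     {
--         "question": "Do you offer warranty on products?",
--         "answer": "All electronics come with a 1-year manufacturer warranty. Furniture has a 2-year warranty. Extended warranties are available at checkout.",
--     },
--     {
--         "question": "How do I change my shipping address?",
--         "answer": "You can update your shipping address before the order ships. Go to your order details or contact support with the new address.",
--     },
--     {
--         "question": "Do you price match?",
--         "answer": "Yes, we offer price matching within 14 days of purchase. The item must be identical and from an authorized retailer.",
--     },
--     {
--         "question": "What if my item arrives damaged?",
--         "answer": "Contact support within 48 hours with photos of the damage. We'll arrange a free replacement or full refund.",
--     },
--     {
--         "question": "Do you have a loyalty program?",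
--         "answer": "Yes! Join AutoRewards for free. Earn 1 point per dollar spent. 100 points = $5 off. Plus exclusive member-only deals.",
--     },
-- ]
--
--
-- def search_faq(query: str) -> list[dict]:
--     """Search FAQ entries by keyword matching, returning top 3 results.
--
--     Single pass: instead of collecting all matches, sorting, and slicing,
--     maintain only the current top-3 (score-descending, ties in FAQ order)
--     by bounded insertion while scanning the FAQ.
--     """
--     terms = query.lower().split()
--
--     top: list[tuple[int, dict]] = []  # at most 3 pairs, score-descending, stable
--     for entry in FAQ_ENTRIES:
--         searchable = f"{entry['question']} {entry['answer']}".lower()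
--         score = sum(1 for term in terms if term in searchable)
--         if score > 0:
--             i = 0
--             while i < len(top) and top[i][0] >= score:
--                 i += 1
--             top.insert(i, (score, entry))
--             del top[3:]
--
--     return [entry for _, entry in top]
-- ===== Notes on version B (the rewrite author's own statement) =====
-- stated objective: alternative
-- what changed: Replaces collect-all-matches + full stable reverse sort + [:3] slice with a single pass over the FAQ that maintains only the current top-3 (score-descending, ties in FAQ order) by bounded insertion and truncation.
import Mathlib
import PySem

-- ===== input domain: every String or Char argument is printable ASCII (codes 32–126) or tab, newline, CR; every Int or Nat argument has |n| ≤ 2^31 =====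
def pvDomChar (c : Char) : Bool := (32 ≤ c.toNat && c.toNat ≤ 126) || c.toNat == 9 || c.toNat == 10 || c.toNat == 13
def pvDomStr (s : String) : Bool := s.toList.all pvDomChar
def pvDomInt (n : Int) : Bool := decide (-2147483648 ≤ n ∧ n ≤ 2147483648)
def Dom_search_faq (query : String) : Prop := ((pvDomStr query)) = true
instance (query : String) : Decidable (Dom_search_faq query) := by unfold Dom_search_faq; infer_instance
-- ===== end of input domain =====

-- B replaces A's full stable reverse sort + [:3] slice by a single-pass bounded top-3 insertion (alternative selection strategy, same results).

-- The module constant FAQ_ENTRIES (each dict as an association list in insertion order).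
def pvFAQ : List (List (String × String)) :=
  [ [("question", "What is your return policy?"),
     ("answer", "You can return any item within 30 days of delivery for a full refund. Items must be in original condition with tags attached.")],
    [("question", "How long does shipping take?"),
     ("answer", "Standard shipping takes 5-7 business days. Express shipping takes 2-3 business days. Free shipping on orders over $50.")],
    [("question", "How do I track my order?"),
     ("answer", "You can track your order using the order ID on our website, or ask me with your order number and I'll look it up for you.")],
    [("question", "Do you offer international shipping?"),
     ("answer", "Yes, we ship to over 50 countries. International shipping takes 10-15 business days. Additional customs fees may apply.")],
    [("question", "How do I cancel an order?"),
     ("answer", "Orders can be cancelled within 1 hour of placement if they haven't entered processing. Contact support with your order ID.")],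
    [("question", "What payment methods do you accept?"),
     ("answer", "We accept Visa, Mastercard, American Express, PayPal, Apple Pay, and Google Pay.")],
    [("question", "How do I contact customer support?"),
     ("answer", "You can reach us via this chat, email at support@autoagent.example.com, or call 1-800-555-0199 Mon-Fri 9am-6pm EST.")],
    [("question", "Do you offer warranty on products?"),
     ("answer", "All electronics come with a 1-year manufacturer warranty. Furniture has a 2-year warranty. Extended warranties are available at checkout.")],
    [("question", "How do I change my shipping address?"),
     ("answer", "You can update your shipping address before the order ships. Go to your order details or contact support with the new address.")],
    [("question", "Do you price match?"),
     ("answer", "Yes, we offer price matching within 14 days of purchase. The item must be identical and from an authorized retailer.")],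
    [("question", "What if my item arrives damaged?"),
     ("answer", "Contact support within 48 hours with photos of the damage. We'll arrange a free replacement or full refund.")],
    [("question", "Do you have a loyalty program?"),
     ("answer", "Yes! Join AutoRewards for free. Earn 1 point per dollar spent. 100 points = $5 off. Plus exclusive member-only deals.")] ]

-- entry['question'] / entry['answer']: both keys are present in every literal entry of pvFAQ, so the "" default is never used.
def pvLookup (entry : List (String × String)) (k : String) : String :=
  ((PySem.Dict.mk entry).get? k).getD ""

-- ===== PORT A =====
def search_faq (query : String) : List (List (String × String)) :=
  let query_lower := PySem.Str.lower query
  let terms := PySem.Str.split₀ query_lower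
  let scored : List (Int × List (String × String)) := pvFAQ.foldl (fun acc entry =>
    let searchable := PySem.Str.lower (pvLookup entry "question" ++ " " ++ pvLookup entry "answer")
    let score : Int := (terms.map (fun term => if PySem.Str.isIn term searchable then (1 : Int) else 0)).sum
    if score > 0 then acc ++ [(score, entry)] else acc) []
  (PySem.List.slice (PySem.List.sorted scored (fun x => x.1) true) none (some 3)).map (fun p => p.2)

-- ===== PORT B =====
-- the 'while i < len(top) and top[i][0] >= score' + 'top.insert(i, ...)' loop of Source B
def pvInsertDesc (s : Int) (e : List (String × String)) :
    List (Int × List (String × String)) → List (Int × List (String × String))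
  | [] => [(s, e)]
  | y :: ys => if s ≤ y.1 then y :: pvInsertDesc s e ys else (s, e) :: y :: ys

def search_faq_alt (query : String) : List (List (String × String)) :=
  let terms := PySem.Str.split₀ (PySem.Str.lower query)
  let top : List (Int × List (String × String)) := pvFAQ.foldl (fun top entry =>
    let searchable := PySem.Str.lower (pvLookup entry "question" ++ " " ++ pvLookup entry "answer")
    let score : Int := (terms.map (fun term => if PySem.Str.isIn term searchable then (1 : Int) else 0)).sum
    if score > 0 then (pvInsertDesc score entry top).take 3 else top) []
  top.map (fun p => p.2)

-- ===== PRECONDITION & SPEC =====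
def Spec_search_faq (query : String) (out : List (List (String × String))) : Prop := out = search_faq_alt query
instance (query : String) (out : List (List (String × String))) : Decidable (Spec_search_faq query out) := by unfold Spec_search_faq; infer_instance

-- ===== CLAIM (what is proved, stated in full; the proofs are below) =====
def Claim_equal_search_faq : Prop := ∀ (query : String), Dom_search_faq query → Spec_search_faq query (search_faq query)

-- ===== LEMMAS AND PROOFS =====

-- Source B's insertion point (after every element of score ≥ s) is exactly insertBy with "strictly smaller score goes after me".
lemma pvInsertDesc_eq (s : Int) (e : List (String × String))
    (l : List (Int × List (String × String))) :
    pvInsertDesc s e l = PySem.List.insertBy (fun a b => decide (b.1 < a.1)) (s, e) l := by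
  induction l with
  | nil => rfl
  | cons y ys ih =>
    simp only [pvInsertDesc, PySem.List.insertBy, ih]
    by_cases h : s ≤ y.1
    · simp [h, not_lt.mpr h]
    · simp [h, not_le.mp h]

-- truncation to the first n elements commutes with insertion.
lemma take_insertBy {α : Type} (b : α → α → Bool) (x : α) (l : List α) (n : Nat) :
    (PySem.List.insertBy b x l).take n = (PySem.List.insertBy b x (l.take n)).take n := by
  induction l generalizing n with
  | nil => simp
  | cons y ys ih =>
    cases n with
    | zero => simp
    | succ m =>
      by_cases h : b x y
      · cases m with
        | zero => simp [PySem.List.insertBy, h]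
        | succ k => simp [PySem.List.insertBy, h, List.take_take]
      · simp [PySem.List.insertBy, h, ih m]

-- hence the insertion-sort fold may be truncated at every step.
lemma foldl_insert_take {α : Type} (b : α → α → Bool) (xs : List α) (acc : List α) (n : Nat) :
    (xs.foldl (fun t x => PySem.List.insertBy b x t) acc).take n
      = xs.foldl (fun t x => (PySem.List.insertBy b x t).take n) (acc.take n) := by
  induction xs generalizing acc with
  | nil => simp
  | cons x xs ih =>
    simp only [List.foldl_cons]
    rw [ih, take_insertBy]

-- core equivalence, for an arbitrary scoring function sc over an arbitrary entry list.
lemma pv_core (sc : List (String × String) → Int) (xs : List (List (String × String))) :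
    (PySem.List.slice
        (PySem.List.sorted
          (xs.foldl (fun acc e => if sc e > 0 then acc ++ [(sc e, e)] else acc)
            ([] : List (Int × List (String × String)))) (fun x => x.1) true)
        none (some 3)).map (fun p => p.2)
      = (xs.foldl (fun t e => if sc e > 0 then (pvInsertDesc (sc e) e t).take 3 else t)
          ([] : List (Int × List (String × String)))).map (fun p => p.2) := by
  rw [PySem.List.slice_to _ (by norm_num),
      PySem.List.foldl_append_ite (p := fun e => sc e > 0) (f := fun e => (sc e, e)),
      PySem.List.foldl_ite_eq_foldl_filter (p := fun e => sc e > 0)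
        (f := fun t e => (pvInsertDesc (sc e) e t).take 3)]
  simp only [List.nil_append]
  set l := xs.filter (fun e => decide (sc e > 0)) with hl
  rw [PySem.List.sorted_rev_eq_foldl_insertBy]
  have hmap : l.foldl (fun t e => (pvInsertDesc (sc e) e t).take 3)
        ([] : List (Int × List (String × String)))
      = (l.map (fun e => (sc e, e))).foldl
          (fun t p => (PySem.List.insertBy (fun a b => decide (b.1 < a.1)) p t).take 3) [] := by
    rw [List.foldl_map]
    simp only [pvInsertDesc_eq]
  rw [hmap]
  rw [show ((3 : Int).toNat) = 3 from rfl]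
  rw [foldl_insert_take]
  simp

-- ===== VERDICT (by name: the statement is the Claim_ definition above) =====
theorem search_faq_spec : Claim_equal_search_faq := by
  intro query _
  unfold Spec_search_faq
  show search_faq query = search_faq_alt query
  simp only [search_faq, search_faq_alt]
  exact pv_core
    (fun entry =>
      ((PySem.Str.split₀ (PySem.Str.lower query)).map
        (fun term =>
          if PySem.Str.isIn term
              (PySem.Str.lower (pvLookup entry "question" ++ " " ++ pvLookup entry "answer"))
          then (1 : Int) else 0)).sum)
    pvFAQ
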